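-- pv_equiv track=rewrite | github.com/Rdinaft/Tic-Tac-Toe | game_state.py | get_winner_per_row
-- ===== SOURCE A (Python) =====
-- def get_winner_per_row(
--     sign_dict: dict[str, str], field: list[list[str | None]], num_of_lines: int
-- ) -> str | None:
--     for participant in sign_dict:
--         for line in range(num_of_lines):
--             if field[line] == [sign_dict[participant]] * len(field[line]):
--                 return participant
--     return None
-- ===== SOURCE B (Python) =====
-- def get_winner_per_row(
--     sign_dict: dict[str, str], field: list[list[str | None]], num_of_lines: int
-- ) -> str | None:
--     # One pass over the rows to collect the signs that fill a whole row,
--     # then one pass over the participants to find the first whose sign did.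
--     completed = set()
--     for row in field[:max(0, num_of_lines)]:
--         if row and row[0] is not None and all(c == row[0] for c in row):
--             completed.add(row[0])
--     for participant, sign in sign_dict.items():
--         if sign in completed:
--             return participant
--     return None
-- ===== Notes on version B (the rewrite author's own statement) =====
-- stated objective: alternative
-- what changed: A rescans all rows of the field for every participant; B makes one pass over the rows building a set of row-filling signs and then a single pass over the participants looking their sign up in that set.
-- intended difference: On a non-empty sign_dict with an empty row among the first num_of_lines rows (and the first participant's sign filling no non-empty row there), A returns the very first participant because [] == [sign]*0 compares equal; B returns the participant who actually fills a row (or None), which is the intended meaning of winning a row. — e.g. on get_winner_per_row([("p", "x")], [[]], 1): A returns some "p", B returns none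
import Mathlib
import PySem

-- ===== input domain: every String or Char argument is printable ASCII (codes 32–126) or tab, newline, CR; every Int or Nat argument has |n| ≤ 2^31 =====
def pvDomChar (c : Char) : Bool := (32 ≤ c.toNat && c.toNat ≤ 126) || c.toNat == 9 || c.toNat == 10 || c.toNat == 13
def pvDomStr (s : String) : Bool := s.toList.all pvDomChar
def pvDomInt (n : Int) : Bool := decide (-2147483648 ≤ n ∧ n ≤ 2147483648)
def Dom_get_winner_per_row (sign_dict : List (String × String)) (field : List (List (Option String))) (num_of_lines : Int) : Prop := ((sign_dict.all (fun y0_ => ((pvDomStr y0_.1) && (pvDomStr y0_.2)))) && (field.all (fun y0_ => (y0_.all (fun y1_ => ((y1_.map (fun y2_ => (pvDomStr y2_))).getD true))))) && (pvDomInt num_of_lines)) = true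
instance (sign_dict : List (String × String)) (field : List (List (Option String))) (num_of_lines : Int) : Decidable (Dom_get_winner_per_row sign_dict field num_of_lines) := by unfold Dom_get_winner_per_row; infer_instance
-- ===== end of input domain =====

-- B replaces A's per-participant rescan of the rows by one pass collecting the row-filling signs into a set, then one pass over the participants (alternative decomposition); on fields with an empty scanned row A accidentally crowns the first participant, B does not (see D_).


-- ===== PORT A =====
-- 'for participant in sign_dict: for line in range(num_of_lines): if field[line] == [sign_dict[participant]]*len(field[line]): return participant'
-- field[line] out of range is an IndexError in Python (excluded by Pre_); the port's 'none => false' branch is only reached outside Pre_.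
-- 'for line in range(num_of_lines)' as the lazy counter loop Python's range is (early return at the first match)
def get_winner_per_row_inner (field : List (List (Option String))) (sign : String) (line num_of_lines : Int) : Bool :=
  if line < num_of_lines then
    (match PySem.List.pyGet? field line with
     | some row => row == List.replicate row.length (some sign)
     | none => false) || get_winner_per_row_inner field sign (line + 1) num_of_lines
  else false
termination_by (num_of_lines - line).toNat
decreasing_by omega

def get_winner_per_row_go (d : PySem.Dict String String) (field : List (List (Option String))) (num_of_lines : Int) : List String → Option String
  | [] => none
  | p :: ps =>
    if get_winner_per_row_inner field (d.getD p "") 0 num_of_lines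
    then some p
    else get_winner_per_row_go d field num_of_lines ps

def get_winner_per_row (sign_dict : List (String × String)) (field : List (List (Option String))) (num_of_lines : Int) : Option String :=
  get_winner_per_row_go (PySem.Dict.ofList sign_dict) field num_of_lines (PySem.Dict.ofList sign_dict).keys

-- ===== PORT B =====
-- one pass over field[:max(0, num_of_lines)]: 'if row and row[0] is not None and all(c == row[0] for c in row): completed.add(row[0])'
def pvRowStep (st : PySem.Set String) (row : List (Option String)) : PySem.Set String :=
  match row with
  | [] => st
  | first :: rest =>
    match first with
    | some s => if (first :: rest).all (fun c => c == some s) then PySem.Set.add st s else st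
    | none => st

def get_winner_per_row_alt_go (st : PySem.Set String) : List (String × String) → Option String
  | [] => none
  | (p, s) :: rest =>
    if PySem.Set.contains st s then some p else get_winner_per_row_alt_go st rest

def get_winner_per_row_alt (sign_dict : List (String × String)) (field : List (List (Option String))) (num_of_lines : Int) : Option String :=
  let rows := PySem.List.slice field none (some (max 0 num_of_lines))
  let completed := rows.foldl pvRowStep PySem.Set.empty
  get_winner_per_row_alt_go completed (PySem.Dict.ofList sign_dict).items

-- ===== PRECONDITION & SPEC =====
-- sign of the FIRST participant of the dict (Python dict: first key, last assigned value)
def pvFirstSign (sign_dict : List (String × String)) : Option String :=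
  ((PySem.Dict.ofList sign_dict).items.head?).map (·.2)

-- Pre_ excludes exactly the inputs where A raises IndexError: num_of_lines exceeds len(field) and the
-- first participant (if any) matches no row of the field, so A's inner loop runs past the end of field.
def Pre_get_winner_per_row (sign_dict : List (String × String)) (field : List (List (Option String))) (num_of_lines : Int) : Prop :=
  num_of_lines ≤ field.length ∨
    ((pvFirstSign sign_dict).all (fun s => field.any (fun row => row.all (fun c => c == some s)))) = true
instance (sign_dict : List (String × String)) (field : List (List (Option String))) (num_of_lines : Int) : Decidable (Pre_get_winner_per_row sign_dict field num_of_lines) := by unfold Pre_get_winner_per_row; infer_instance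

def pvWitness_get_winner_per_row : (List (String × String)) × List (List (Option String)) × Int :=
  ([("p", "x"), ("q", "o")], [[some "o", some "o"], [some "x", none]], 2)

-- On a non-empty sign_dict with an empty row among the first num_of_lines rows (the first participant's
-- sign filling no non-empty row there), A returns the very first participant because [] == [sign]*0 compares
-- equal, while B returns the participant who actually fills a row (or None) — the intended meaning of winning a row.
def D_get_winner_per_row (sign_dict : List (String × String)) (field : List (List (Option String))) (num_of_lines : Int) : Prop :=
  ((PySem.Dict.ofList sign_dict).items.head?.any fun p =>
    (field.take num_of_lines.toNat).any List.isEmpty &&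
      (field.take num_of_lines.toNat).all fun r => r.isEmpty || !r.all fun c => c == some p.2) = true
instance (sign_dict : List (String × String)) (field : List (List (Option String))) (num_of_lines : Int) : Decidable (D_get_winner_per_row sign_dict field num_of_lines) := by unfold D_get_winner_per_row; infer_instance

def Spec_get_winner_per_row (sign_dict : List (String × String)) (field : List (List (Option String))) (num_of_lines : Int) (out : Option String) : Prop := ¬ D_get_winner_per_row sign_dict field num_of_lines → out = get_winner_per_row_alt sign_dict field num_of_lines
instance (sign_dict : List (String × String)) (field : List (List (Option String))) (num_of_lines : Int) (out : Option String) : Decidable (Spec_get_winner_per_row sign_dict field num_of_lines out) := by unfold Spec_get_winner_per_row; infer_instance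

def pvDiffWitness_get_winner_per_row : (List (String × String)) × List (List (Option String)) × Int :=
  ([("p", "x")], [[]], 1)

def pvDiffWitnessOut_get_winner_per_row : (Option String) × (Option String) := (some "p", none)

-- ===== CLAIM (what is proved, stated in full; the proofs are below) =====
def Claim_unchanged_get_winner_per_row : Prop := ∀ (sign_dict : List (String × String)) (field : List (List (Option String))) (num_of_lines : Int), Dom_get_winner_per_row sign_dict field num_of_lines → Pre_get_winner_per_row sign_dict field num_of_lines → Spec_get_winner_per_row sign_dict field num_of_lines (get_winner_per_row sign_dict field num_of_lines)
def Claim_changed_get_winner_per_row : Prop := Dom_get_winner_per_row (pvDiffWitness_get_winner_per_row.1) (pvDiffWitness_get_winner_per_row.2.1) (pvDiffWitness_get_winner_per_row.2.2) ∧ Pre_get_winner_per_row (pvDiffWitness_get_winner_per_row.1) (pvDiffWitness_get_winner_per_row.2.1) (pvDiffWitness_get_winner_per_row.2.2) ∧ D_get_winner_per_row (pvDiffWitness_get_winner_per_row.1) (pvDiffWitness_get_winner_per_row.2.1) (pvDiffWitness_get_winner_per_row.2.2) ∧ get_winner_per_row (pvDiffWitness_get_winner_per_row.1) (pvDiffWitness_get_winner_per_row.2.1)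 (pvDiffWitness_get_winner_per_row.2.2) = pvDiffWitnessOut_get_winner_per_row.1 ∧ get_winner_per_row_alt (pvDiffWitness_get_winner_per_row.1) (pvDiffWitness_get_winner_per_row.2.1) (pvDiffWitness_get_winner_per_row.2.2) = pvDiffWitnessOut_get_winner_per_row.2 ∧ pvDiffWitnessOut_get_winner_per_row.1 ≠ pvDiffWitnessOut_get_winner_per_row.2
def Claim_exact_get_winner_per_row : Prop := ∀ (sign_dict : List (String × String)) (field : List (List (Option String))) (num_of_lines : Int), Dom_get_winner_per_row sign_dict field num_of_lines → Pre_get_winner_per_row sign_dict field num_of_lines → D_get_winner_per_row sign_dict field num_of_lines → get_winner_per_row sign_dict field num_of_lines ≠ get_winner_per_row_alt sign_dict field num_of_lines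

-- ===== LEMMAS AND PROOFS =====

-- the rows A's loop can inspect / B slices off
def pvRows (field : List (List (Option String))) (n : Int) : List (List (Option String)) :=
  field.take n.toNat

-- a row equals [sign]*len(row) iff every cell is that sign
theorem pvPred_eq_all (row : List (Option String)) (s : String) :
    (row == List.replicate row.length (some s)) = row.all (fun c => c == some s) := by
  rw [Bool.eq_iff_iff]
  simp [List.eq_replicate_iff, List.all_eq_true]

-- A's inner loop over range(num_of_lines) is a scan of the first num_of_lines rows
theorem pvA_any (field : List (List (Option String))) (n : Int) (p : List (Option String) → Bool) :
    ((PySem.List.pyRange 0 n 1).any (fun line =>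
        match PySem.List.pyGet? field line with
        | some row => p row
        | none => false)) = (field.take n.toNat).any p := by
  rw [Bool.eq_iff_iff]
  simp only [List.any_eq_true, PySem.List.mem_pyRange_one]
  constructor
  · rintro ⟨x, ⟨hx0, hxn⟩, hm⟩
    rcases h : PySem.List.pyGet? field x with _ | row
    · rw [h] at hm; exact absurd hm (by simp)
    · rw [h] at hm
      have hx : x = ((x.toNat : Nat) : Int) := by omega
      rw [hx, PySem.List.pyGet?_natCast] at h
      have hlt : x.toNat < field.length := by
        by_contra hge
        rw [List.getElem?_eq_none (by omega)] at h
        exact absurd h (by simp)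
      have hrow : field[x.toNat] = row := by
        rw [List.getElem?_eq_getElem hlt] at h
        exact Option.some.inj h
      refine ⟨row, ?_, hm⟩
      rw [← hrow]
      have hmin : x.toNat < min n.toNat field.length := by omega
      have : (field.take n.toNat)[x.toNat]'(by simpa using hmin) = field[x.toNat] :=
        List.getElem_take
      rw [← this]
      exact List.getElem_mem _
  · rintro ⟨row, hmem, hp⟩
    rcases List.getElem_of_mem hmem with ⟨i, hi, hrow⟩
    have hi' : i < min n.toNat field.length := by simpa using hi
    refine ⟨(i : Int), ⟨by omega, by omega⟩, ?_⟩
    rw [PySem.List.pyGet?_natCast]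
    rw [List.getElem?_eq_getElem (by omega)]
    have : field[i]'(by omega) = row := by
      rw [← hrow]; exact (List.getElem_take).symm
    simpa [this] using hp

-- A's counter loop is the scan over range(line, num_of_lines)
theorem pvInner_eq (field : List (List (Option String))) (sign : String) (n : Int) :
    ∀ (k : Nat) (line : Int), (n - line).toNat = k →
      get_winner_per_row_inner field sign line n =
        (PySem.List.pyRange line n 1).any (fun l =>
          match PySem.List.pyGet? field l with
          | some row => row == List.replicate row.length (some sign)
          | none => false) := by
  intro k
  induction k using Nat.strong_induction_on with
  | _ k ih =>
    intro line hk
    rw [get_winner_per_row_inner]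
    by_cases h : line < n
    · rw [if_pos h, PySem.List.pyRange_one_cons h, List.any_cons]
      rw [ih ((n - (line + 1)).toNat) (by omega) (line + 1) rfl]
    · rw [if_neg h, PySem.List.pyRange_one_eq_nil (by omega)]
      rfl

-- the condition A tests for a sign, as a scan of the visible rows
theorem pvAcond (field : List (List (Option String))) (n : Int) (s : String) :
    get_winner_per_row_inner field s 0 n =
      (pvRows field n).any (fun row => row.all (fun c => c == some s)) := by
  rw [pvInner_eq field s n (n - 0).toNat 0 rfl, pvA_any]
  simp only [pvRows, pvPred_eq_all]

-- one step of B's indexing pass, read through 'sign in completed'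
theorem pvStep_contains (st : PySem.Set String) (row : List (Option String)) (s : String) :
    PySem.Set.contains (pvRowStep st row) s =
      (PySem.Set.contains st s || (!row.isEmpty && row.all (fun c => c == some s))) := by
  rw [Bool.eq_iff_iff]
  rcases row with _ | ⟨first, rest⟩
  · simp [pvRowStep]
  · rcases first with _ | s0
    · have hst : pvRowStep st (none :: rest) = st := rfl
      have hp : ((none :: rest).all (fun c => c == some s)) = false := by
        simp [List.all_cons]
      rw [hst, hp]; simp
    · by_cases hall : (some s0 :: rest).all (fun c => c == some s0) = true
      · have hiff : ((some s0 :: rest).all (fun c => c == some s) = true) ↔ s = s0 := by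
          constructor
          · intro h
            simp only [List.all_cons, Bool.and_eq_true] at h
            have h0 : s0 = s := by simpa using h.1
            exact h0.symm
          · intro h; subst h; exact hall
        have hst : pvRowStep st (some s0 :: rest) = PySem.Set.add st s0 := by
          simp [pvRowStep, hall]
        rw [hst]
        simp only [Bool.or_eq_true, Bool.and_eq_true, PySem.Set.contains_iff, PySem.Set.mem_add,
          List.isEmpty_cons, Bool.not_false]
        rw [hiff]
        tauto
      · have hns : ((some s0 :: rest).all (fun c => c == some s)) = false := by
          rw [Bool.eq_false_iff]
          intro h
          have h0 : s0 = s := by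
            simp only [List.all_cons, Bool.and_eq_true] at h
            simpa using h.1
          exact hall (h0 ▸ h)
        have hst : pvRowStep st (some s0 :: rest) = st := by
          simp [pvRowStep, hall]
        rw [hst, hns]
        simp

theorem pvFold_contains (rows : List (List (Option String))) (s : String) :
    ∀ st : PySem.Set String,
      PySem.Set.contains (rows.foldl pvRowStep st) s =
        (PySem.Set.contains st s ||
          rows.any (fun row => !row.isEmpty && row.all (fun c => c == some s))) := by
  induction rows with
  | nil => intro st; simp
  | cons r rs ih =>
    intro st
    simp only [List.foldl_cons, List.any_cons, ih, pvStep_contains]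
    rw [Bool.eq_iff_iff]; simp; tauto

-- the condition B tests for a sign, as a scan of the visible rows
theorem pvBcond (field : List (List (Option String))) (n : Int) (s : String) :
    PySem.Set.contains
        ((PySem.List.slice field none (some (max 0 n))).foldl pvRowStep PySem.Set.empty) s =
      (pvRows field n).any (fun row => !row.isEmpty && row.all (fun c => c == some s)) := by
  rw [pvFold_contains, PySem.List.slice_to _ (le_max_left 0 n)]
  have h : (max 0 n).toNat = n.toNat := by omega
  rw [h]
  simp [PySem.Set.empty, pvRows]

-- the two scans agree on every participant's sign when the visible rows agree per sign
theorem pvGo_eq (d : PySem.Dict String String) (field : List (List (Option String))) (n : Int)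
    (st : PySem.Set String)
    (hcond : ∀ s, get_winner_per_row_inner field s 0 n = PySem.Set.contains st s) :
    ∀ l : List (String × String), (∀ kv ∈ l, d.getD kv.1 "" = kv.2) →
      get_winner_per_row_go d field n (l.map (·.1)) = get_winner_per_row_alt_go st l := by
  intro l
  induction l with
  | nil => intro _; rfl
  | cons kv rest ih =>
    intro h
    obtain ⟨p, s⟩ := kv
    have hv : d.getD p "" = s := h (p, s) (by simp)
    simp only [List.map_cons, get_winner_per_row_go, get_winner_per_row_alt_go, hv, hcond]
    split
    · rfl
    · exact ih (fun kv hm => h kv (by simp [hm]))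

-- B's participant scan only returns keys of its list
theorem pvAltGo_mem (st : PySem.Set String) :
    ∀ (l : List (String × String)) (p : String),
      get_winner_per_row_alt_go st l = some p → p ∈ l.map (·.1) := by
  intro l
  induction l with
  | nil => intro p h; exact absurd h (by simp [get_winner_per_row_alt_go])
  | cons kv rest ih =>
    intro p h
    obtain ⟨q, s⟩ := kv
    by_cases hc : PySem.Set.contains st s = true
    · simp only [get_winner_per_row_alt_go, hc, if_pos] at h
      simp [← Option.some.inj h]
    · simp only [get_winner_per_row_alt_go, hc, if_neg, Bool.false_eq_true, not_false_iff] at h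
      simp [ih p h]

-- when no visible row is empty the per-sign conditions coincide
theorem pvAny_nonempty (rows : List (List (Option String)))
    (hne : rows.any (fun row => row.isEmpty) = false) (q : List (Option String) → Bool) :
    rows.any q = rows.any (fun row => !row.isEmpty && q row) := by
  induction rows with
  | nil => rfl
  | cons r rs ih =>
    simp only [List.any_cons, Bool.or_eq_false_iff] at hne
    simp only [List.any_cons, ih hne.2, hne.1, Bool.not_false, Bool.true_and]

-- getD on a member of the items of an ofList dict
theorem pvGetD_items (sign_dict : List (String × String)) (kv : String × String)
    (hm : kv ∈ (PySem.Dict.ofList sign_dict).items) :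
    (PySem.Dict.ofList sign_dict).getD kv.1 "" = kv.2 :=
  PySem.Dict.getD_of_mem_items _ hm (PySem.Dict.nodup_keys_ofList sign_dict) ""

-- ===== VERDICT (by name: the statement is the Claim_ definition above) =====
theorem get_winner_per_row_spec : Claim_unchanged_get_winner_per_row := by
  intro sign_dict field num_of_lines _ _ hD
  unfold get_winner_per_row get_winner_per_row_alt
  by_cases hne : (pvRows field num_of_lines).any (fun row => row.isEmpty) = true
  · -- an empty row is visible: ¬D_ forces the dict empty or the first sign to fill a non-empty row
    rcases hitems : (PySem.Dict.ofList sign_dict).items with _ | ⟨⟨p1, s1⟩, rest⟩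
    · have hkeys : (PySem.Dict.ofList sign_dict).keys = [] := by
        show (PySem.Dict.ofList sign_dict).items.map (·.1) = []
        rw [hitems]; rfl
      rw [hkeys]; rfl
    · have hfs : pvFirstSign sign_dict = some s1 := by
        unfold pvFirstSign; rw [hitems]; rfl
      have hall : ((field.take num_of_lines.toNat).all
          fun r => r.isEmpty || !r.all fun c => c == some s1) = false := by
        by_contra h
        rw [Bool.not_eq_false] at h
        exact hD (by unfold D_get_winner_per_row; rw [hitems]
                     simpa [Option.any] using And.intro hne h)
      have hB : ((pvRows field num_of_lines).any
          (fun row => !row.isEmpty && row.all (fun c => c == some s1))) = true := by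
        rw [← Bool.not_eq_true, List.all_eq_true] at hall
        push Not at hall
        obtain ⟨r, hrm, hr⟩ := hall
        refine List.any_eq_true.mpr ⟨r, hrm, ?_⟩
        revert hr
        cases r.isEmpty <;> cases r.all (fun c => c == some s1) <;> simp
      have hA : get_winner_per_row_inner field s1 0 num_of_lines = true := by
        rw [pvAcond]
        rcases List.any_eq_true.mp hB with ⟨row, hrm, hrow⟩
        exact List.any_eq_true.mpr ⟨row, hrm, (Bool.and_eq_true _ _ |>.mp hrow).2⟩
      have hv : (PySem.Dict.ofList sign_dict).getD p1 "" = s1 :=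
        pvGetD_items sign_dict (p1, s1) (by rw [hitems]; simp)
      have hkeys : (PySem.Dict.ofList sign_dict).keys = p1 :: rest.map (·.1) := by
        show (PySem.Dict.ofList sign_dict).items.map (·.1) = _
        rw [hitems]; rfl
      rw [hkeys]
      simp only [get_winner_per_row_go, get_winner_per_row_alt_go, hv, hA, if_pos]
      rw [pvBcond, hB]
      rfl
  · -- no empty row visible: the two per-sign conditions coincide, plain congruence
    refine pvGo_eq _ field num_of_lines _ (fun s => ?_)
      (PySem.Dict.ofList sign_dict).items (fun kv hm => pvGetD_items sign_dict kv hm)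
    rw [pvAcond, pvBcond, pvAny_nonempty _ (Bool.not_eq_true _ ▸ hne)]

theorem get_winner_per_row_changed : Claim_changed_get_winner_per_row := by
  unfold Claim_changed_get_winner_per_row
  refine ⟨by decide, by decide, by decide, ?_, by decide, by decide⟩
  show get_winner_per_row [("p", "x")] [[]] 1 = some "p"
  have hin : get_winner_per_row_inner [[]] "x" 0 1 = true := by
    rw [get_winner_per_row_inner]
    simp [PySem.List.pyGet?, PySem.List.pyIdx?]
  have hk : (PySem.Dict.ofList [("p", "x")]).keys = ["p"] := by decide
  have hg : (PySem.Dict.ofList [("p", "x")]).getD "p" "" = "x" := by decide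
  unfold get_winner_per_row
  rw [hk]
  simp [get_winner_per_row_go, hg, hin]

theorem get_winner_per_row_tight : Claim_exact_get_winner_per_row := by
  intro sign_dict field num_of_lines _ _ hD
  unfold D_get_winner_per_row at hD
  rcases hitems : (PySem.Dict.ofList sign_dict).items with _ | ⟨⟨p1, s1⟩, rest⟩
  · rw [hitems] at hD; exact absurd hD (by simp [Option.any])
  · rw [hitems] at hD
    simp only [Option.any, List.head?, Bool.and_eq_true] at hD
    obtain ⟨hne', hall⟩ := hD
    have hne : ((pvRows field num_of_lines).any (fun row => row.isEmpty)) = true := hne'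
    have hB : ((pvRows field num_of_lines).any
        (fun row => !row.isEmpty && row.all (fun c => c == some s1))) = false := by
      rw [← Bool.not_eq_true, List.any_eq_true]
      rintro ⟨r, hrm, hr⟩
      simp only [Bool.and_eq_true, Bool.not_eq_true'] at hr
      have := List.all_eq_true.mp hall r hrm
      simp only [Bool.or_eq_true, Bool.not_eq_true'] at this
      rcases this with h | h
      · exact absurd h (by simp [hr.1])
      · exact absurd hr.2 (by simp [h])
    have hA : get_winner_per_row_inner field s1 0 num_of_lines = true := by
      rw [pvAcond]
      rcases List.any_eq_true.mp hne with ⟨row, hrm, hrow⟩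
      refine List.any_eq_true.mpr ⟨row, hrm, ?_⟩
      rw [List.isEmpty_iff.mp hrow]; rfl
    have hv : (PySem.Dict.ofList sign_dict).getD p1 "" = s1 :=
      pvGetD_items sign_dict (p1, s1) (by rw [hitems]; simp)
    have hkeys : (PySem.Dict.ofList sign_dict).keys = p1 :: rest.map (·.1) := by
      show (PySem.Dict.ofList sign_dict).items.map (·.1) = _
      rw [hitems]; rfl
    have hAval : get_winner_per_row sign_dict field num_of_lines = some p1 := by
      unfold get_winner_per_row
      rw [hkeys]
      simp only [get_winner_per_row_go, hv, hA, if_pos]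
    intro heq
    have hBval := heq ▸ hAval
    unfold get_winner_per_row_alt at hBval
    rw [hitems] at hBval
    simp only [get_winner_per_row_alt_go] at hBval
    rw [pvBcond, hB] at hBval
    simp only [Bool.false_eq_true, if_neg, not_false_iff] at hBval
    have hmem : p1 ∈ rest.map (·.1) := pvAltGo_mem _ rest p1 hBval
    have hnodup : ((PySem.Dict.ofList sign_dict).items.map (·.1)).Nodup :=
      PySem.Dict.nodup_keys_ofList sign_dict
    rw [hitems, List.map_cons] at hnodup
    exact (List.nodup_cons.mp hnodup).1 hmem
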